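-- pv_equiv track=rewrite | github.com/YogurtBoy/YogurtChords | main.py | list_to_staff
-- ===== SOURCE A (Python) =====
-- TIME_SIGNATURE_NUM = 4
--
-- def list_to_staff(song_bank_list: list):
--     # Append a treble clef
--     staff_string = '&['
--     for bank_c in range(len(song_bank_list)):
--         # Make measure break lines at the end of each measure
--         if not (bank_c % TIME_SIGNATURE_NUM) and bank_c:
--             staff_string += ' | '
--
--         staff_string += song_bank_list[bank_c]
--
--     staff_string += ']'
--
--     return staff_string
-- ===== SOURCE B (Python) =====
-- TIME_SIGNATURE_NUM = 4
--
--
-- def list_to_staff(song_bank_list: list):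
--     # Two-level grouping: chunk into measures of 4, join each measure,
--     # then join measures with the measure-break separator.
--     measures = [''.join(song_bank_list[i:i + TIME_SIGNATURE_NUM])
--                 for i in range(0, len(song_bank_list), TIME_SIGNATURE_NUM)]
--     return '&[' + ' | '.join(measures) + ']'
-- ===== Notes on version B (the rewrite author's own statement) =====
-- stated objective: idiomatic
-- what changed: Replaces the flat modulo-indexed append loop by two-level grouping: slice the list into chunks of 4, join each chunk into a measure string, and join the measures with ' | ' between '&[' and ']'.
import Mathlib
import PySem

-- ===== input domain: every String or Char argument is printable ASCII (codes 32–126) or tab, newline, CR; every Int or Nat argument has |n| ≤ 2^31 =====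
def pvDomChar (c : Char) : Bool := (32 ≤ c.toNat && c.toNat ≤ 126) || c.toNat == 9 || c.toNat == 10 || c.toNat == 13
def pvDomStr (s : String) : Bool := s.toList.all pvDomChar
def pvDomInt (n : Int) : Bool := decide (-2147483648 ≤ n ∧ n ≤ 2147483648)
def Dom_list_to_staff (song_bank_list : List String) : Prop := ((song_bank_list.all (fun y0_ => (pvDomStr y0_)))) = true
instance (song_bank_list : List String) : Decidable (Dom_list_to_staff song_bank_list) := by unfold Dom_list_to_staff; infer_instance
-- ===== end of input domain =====

-- B replaces A's flat modulo-indexed append loop by two-level grouping (chunk into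
-- measures of 4, join each measure, join measures with ' | '); same cost, more idiomatic.


-- ===== PORT A =====
-- for bank_c in range(len(song_bank_list)): if not (bank_c % 4) and bank_c: += ' | '; += song_bank_list[bank_c]
def list_to_staff (song_bank_list : List String) : String :=
  (List.range song_bank_list.length).foldl
    (fun staff_string bank_c =>
      (if bank_c % 4 == 0 && bank_c != 0 then staff_string ++ " | " else staff_string)
        ++ song_bank_list.getD bank_c "")
    "&[" ++ "]"

-- ===== PORT B =====
-- measures = [''.join(song_bank_list[i:i+4]) for i in range(0, len(song_bank_list), 4)]
def pvMeasures (song_bank_list : List String) : List String :=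
  (PySem.List.pyRange 0 song_bank_list.length 4).map
    (fun i => PySem.Str.join "" (PySem.List.slice song_bank_list (some i) (some (i + 4))))

-- '&[' + ' | '.join(measures) + ']'
def list_to_staff_alt (song_bank_list : List String) : String :=
  "&[" ++ PySem.Str.join " | " (pvMeasures song_bank_list) ++ "]"

-- ===== PRECONDITION & SPEC =====
def Spec_list_to_staff (song_bank_list : List String) (out : String) : Prop := out = list_to_staff_alt song_bank_list
instance (song_bank_list : List String) (out : String) : Decidable (Spec_list_to_staff song_bank_list out) := by unfold Spec_list_to_staff; infer_instance

-- ===== CLAIM (what is proved, stated in full; the proofs are below) =====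
def Claim_equal_list_to_staff : Prop := ∀ (song_bank_list : List String), Dom_list_to_staff song_bank_list → Spec_list_to_staff song_bank_list (list_to_staff song_bank_list)

-- ===== LEMMAS AND PROOFS =====

-- the separator as a char list
def pvSep : List Char := (" | " : String).toList

-- A's per-index contribution, on char lists (top-level loop: no separator before index 0)
def pvGA (xs : List String) (i : Nat) : List Char :=
  (if i % 4 == 0 && i != 0 then pvSep else []) ++ (xs.getD i "").toList

-- per-index contribution of the loop's tail after the first measure (separator also at 0)
def pvGT (xs : List String) (i : Nat) : List Char :=
  (if i % 4 == 0 then pvSep else []) ++ (xs.getD i "").toList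

-- B's chunk decomposition as a recursion (proof-side view of pvMeasures)
def pvChunked (xs : List String) : List String :=
  if xs = [] then []
  else PySem.Str.join "" (xs.take 4) :: pvChunked (xs.drop 4)
termination_by xs.length
decreasing_by
  rename_i h
  have : xs.length ≠ 0 := by simpa [List.length_eq_zero_iff] using h
  simp [List.length_drop]; omega

theorem pvJoin_nil_sep (l : List (List Char)) : PySem.Chars.join ("" : String).toList l = l.flatten := by
  rw [show ("" : String).toList = [] from rfl]
  induction l with
  | nil => simp [PySem.Chars.join_nil]
  | cons p rest ih =>
    cases rest with
    | nil => simp [PySem.Chars.join_singleton]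
    | cons q r => simpa [PySem.Chars.join_cons_cons] using ih

theorem pvJoin_cons (sep : List Char) (c : List Char) (cs : List (List Char)) :
    PySem.Chars.join sep (c :: cs) = c ++ (cs.map (fun d => sep ++ d)).flatten := by
  induction cs generalizing c with
  | nil => simp [PySem.Chars.join_singleton]
  | cons q r ih => simp [PySem.Chars.join_cons_cons, ih q]

theorem pvMap_getD_range (xs : List String) :
    (List.range xs.length).map (fun i => (xs.getD i "").toList) = xs.map String.toList := by
  apply List.ext_getElem
  · simp
  · intro i h1 h2
    simp only [List.length_map, List.length_range] at h1
    simp [List.getD, h1]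

-- the fold, on char lists
theorem pvFoldA (xs : List String) (l : List Nat) (acc : String) :
    (l.foldl (fun staff_string bank_c =>
        (if bank_c % 4 == 0 && bank_c != 0 then staff_string ++ " | " else staff_string)
          ++ xs.getD bank_c "") acc).toList
      = acc.toList ++ (l.map (pvGA xs)).flatten := by
  induction l generalizing acc with
  | nil => simp
  | cons i t ih =>
    simp only [List.foldl, ih, List.map, List.flatten]
    split <;> simp_all [pvGA, pvSep]

theorem pvChunked_nil : pvChunked [] = [] := by
  simp [pvChunked]

theorem pvChunked_cons (xs : List String) (h : xs ≠ []) :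
    pvChunked xs = PySem.Str.join "" (xs.take 4) :: pvChunked (xs.drop 4) := by
  rw [pvChunked]; simp [h]

theorem pvSliceElem (ys : List String) (k : Nat) :
    PySem.List.slice ys (some ((0:Int) + 4*(k:Nat))) (some ((0:Int) + 4*(k:Nat) + 4))
      = (ys.drop (4*k)).take 4 := by
  have h1 : ((0:Int) + 4*(k:Nat)) = ((4*k : Nat) : Int) := by push_cast; ring
  rw [h1]
  have h3 : ((4*k:Nat):Int) + 4 = ((4*k:Nat):Int) + ((4:Nat):Int) := by norm_num
  rw [h3, PySem.List.slice_natCast_add]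

theorem pvMeasures_eq (xs : List String) :
    pvMeasures xs = (List.range ((xs.length + 3)/4)).map
      (fun k => PySem.Str.join "" ((xs.drop (4*k)).take 4)) := by
  unfold pvMeasures
  rw [PySem.List.pyRange_of_pos 0 xs.length (s := 4) (by norm_num)]
  by_cases h : 0 < xs.length
  · have hlt : (0:Int) < xs.length := by exact_mod_cast h
    rw [if_pos hlt]
    have hcnt : (((xs.length:Int) - 0 + 4 - 1)/4).toNat = (xs.length + 3)/4 := by omega
    rw [hcnt, List.map_map]
    apply List.map_congr_left
    intro k _
    simp only [Function.comp]
    rw [pvSliceElem]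
  · have h0 : xs.length = 0 := by omega
    simp [h0]

theorem pvMeasures_chunk_aux (N : Nat) : ∀ (xs : List String), xs.length ≤ N →
    pvMeasures xs = pvChunked xs := by
  induction N with
  | zero =>
    intro xs h
    have : xs = [] := by simpa [List.length_eq_zero_iff] using Nat.le_zero.mp h
    subst this
    simp [pvMeasures_eq, pvChunked_nil]
  | succ N ih =>
    intro xs hN
    by_cases h : xs = []
    · subst h; simp [pvMeasures_eq, pvChunked_nil]
    · have hpos : 0 < xs.length := List.length_pos_iff.mpr h
      rw [pvMeasures_eq, pvChunked_cons xs h,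
        ← ih (xs.drop 4) (by simp [List.length_drop]; omega), pvMeasures_eq]
      have hm : (xs.length + 3)/4 = (((xs.drop 4).length + 3)/4) + 1 := by
        simp [List.length_drop]; omega
      have hl : (List.drop 4 xs).length = xs.length - 4 := by simp
      rw [hm, hl, List.range_succ_eq_map, List.map_cons, List.map_map]
      refine congrArg₂ List.cons (by simp) ?_
      apply List.map_congr_left
      intro k _
      simp only [Function.comp, Nat.succ_eq_add_one, List.drop_drop]
      rw [show 4*(k+1) = 4+4*k from by ring]

theorem pvMeasures_eq_chunked (xs : List String) : pvMeasures xs = pvChunked xs :=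
  pvMeasures_chunk_aux xs.length xs le_rfl

theorem pvGT_shift (xs : List String) (k : Nat) : pvGT xs (4+k) = pvGT (xs.drop 4) k := by
  have hmod : (4+k) % 4 = k % 4 := by omega
  simp [pvGT, hmod]

theorem pvGA_shift (xs : List String) (k : Nat) : pvGA xs (4+k) = pvGT (xs.drop 4) k := by
  have hmod : (4+k) % 4 = k % 4 := by omega
  simp [pvGA, pvGT, hmod]

theorem pvBlockT (ys : List String) (h0 : ys ≠ []) (h4 : ys.length ≤ 4) :
    ((List.range ys.length).map (pvGT ys)).flatten
      = pvSep ++ (ys.map String.toList).flatten := by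
  obtain ⟨x, t, rfl⟩ := List.exists_cons_of_ne_nil h0
  have ht : t.length ≤ 3 := by have := h4; simp [List.length_cons] at this; omega
  rw [List.length_cons, List.range_succ_eq_map, List.map_cons, List.map_map]
  have hc : ∀ k ∈ List.range t.length, (pvGT (x :: t) ∘ Nat.succ) k = (t.getD k "").toList := by
    intro k hk
    have hk3 : k < 3 := lt_of_lt_of_le (List.mem_range.mp hk) ht
    have : (k+1) % 4 ≠ 0 := by omega
    simp [pvGT, Nat.succ_eq_add_one, this]
  rw [List.map_congr_left hc, pvMap_getD_range]
  simp [pvGT]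

theorem pvBlockA (ys : List String) (h4 : ys.length ≤ 4) :
    ((List.range ys.length).map (pvGA ys)).flatten = (ys.map String.toList).flatten := by
  cases ys with
  | nil => simp
  | cons x t =>
  have ht : t.length ≤ 3 := by have := h4; simp [List.length_cons] at this; omega
  rw [List.length_cons, List.range_succ_eq_map, List.map_cons, List.map_map]
  have hc : ∀ k ∈ List.range t.length, (pvGA (x :: t) ∘ Nat.succ) k = (t.getD k "").toList := by
    intro k hk
    have hk3 : k < 3 := lt_of_lt_of_le (List.mem_range.mp hk) ht
    have : (k+1) % 4 ≠ 0 := by omega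
    simp [pvGA, Nat.succ_eq_add_one, this]
  rw [List.map_congr_left hc, pvMap_getD_range]
  simp [pvGA]

theorem pvTail_aux (N : Nat) : ∀ (xs : List String), xs.length ≤ N →
    ((List.range xs.length).map (pvGT xs)).flatten
      = ((pvChunked xs).map (fun c => pvSep ++ c.toList)).flatten := by
  induction N with
  | zero =>
    intro xs h
    have : xs = [] := by simpa [List.length_eq_zero_iff] using Nat.le_zero.mp h
    subst this; simp [pvChunked_nil]
  | succ N ih =>
    intro xs hN
    by_cases h : xs = []
    · subst h; simp [pvChunked_nil]
    rw [pvChunked_cons xs h, List.map_cons, List.flatten_cons,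
      PySem.Str.toList_join, pvJoin_nil_sep]
    by_cases h4 : xs.length ≤ 4
    · have hdrop : xs.drop 4 = [] := List.drop_eq_nil_of_le h4
      have htake : xs.take 4 = xs := List.take_of_length_le h4
      rw [pvBlockT xs h h4, hdrop, pvChunked_nil, htake]
      simp
    · obtain ⟨m, hm⟩ : ∃ m, xs.length = 4 + m := ⟨xs.length - 4, by omega⟩
      rw [hm, List.range_add, List.map_append, List.flatten_append, List.map_map]
      have hfirst : (List.range 4).map (pvGT xs) = (List.range (xs.take 4).length).map (pvGT (xs.take 4)) := by
        have hl : (xs.take 4).length = 4 := by simp; omega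
        rw [hl]
        apply List.map_congr_left
        intro i hi
        have hi4 : i < 4 := List.mem_range.mp hi
        simp [pvGT, List.getD, List.getElem?_take_of_lt hi4]
      have hsecond : (List.range m).map (pvGT xs ∘ (fun x => 4 + x)) = (List.range (xs.drop 4).length).map (pvGT (xs.drop 4)) := by
        have hl : (xs.drop 4).length = m := by simp [List.length_drop]; omega
        rw [hl]
        apply List.map_congr_left
        intro k _
        simp only [Function.comp]
        exact pvGT_shift xs k
      rw [hfirst, hsecond,
        pvBlockT (xs.take 4) (by simp [List.take_eq_nil_iff]; omega) (by simp),
        ih (xs.drop 4) (by simp [List.length_drop]; omega)]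

theorem pvMain (xs : List String) :
    ((List.range xs.length).map (pvGA xs)).flatten
      = PySem.Chars.join pvSep ((pvChunked xs).map String.toList) := by
  by_cases h : xs = []
  · subst h; simp [pvChunked_nil, PySem.Chars.join_nil]
  rw [pvChunked_cons xs h, List.map_cons, pvJoin_cons, PySem.Str.toList_join, pvJoin_nil_sep]
  by_cases h4 : xs.length ≤ 4
  · have hdrop : xs.drop 4 = [] := List.drop_eq_nil_of_le h4
    have htake : xs.take 4 = xs := List.take_of_length_le h4
    rw [pvBlockA xs h4, hdrop, pvChunked_nil, htake]
    simp
  · obtain ⟨m, hm⟩ : ∃ m, xs.length = 4 + m := ⟨xs.length - 4, by omega⟩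
    rw [hm, List.range_add, List.map_append, List.flatten_append, List.map_map]
    have hfirst : (List.range 4).map (pvGA xs) = (List.range (xs.take 4).length).map (pvGA (xs.take 4)) := by
      have hl : (xs.take 4).length = 4 := by simp; omega
      rw [hl]
      apply List.map_congr_left
      intro i hi
      have hi4 : i < 4 := List.mem_range.mp hi
      simp [pvGA, List.getD, List.getElem?_take_of_lt hi4]
    have hsecond : (List.range m).map (pvGA xs ∘ (fun x => 4 + x)) = (List.range (xs.drop 4).length).map (pvGT (xs.drop 4)) := by
      have hl : (xs.drop 4).length = m := by simp [List.length_drop]; omega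
      rw [hl]
      apply List.map_congr_left
      intro k _
      simp only [Function.comp]
      exact pvGA_shift xs k
    rw [hfirst, hsecond,
      pvBlockA (xs.take 4) (by simp),
      pvTail_aux (xs.drop 4).length (xs.drop 4) le_rfl]
    simp only [List.map_map]
    rfl

-- ===== VERDICT (by name: the statement is the Claim_ definition above) =====
theorem list_to_staff_spec : Claim_equal_list_to_staff := by
  intro xs _
  unfold Spec_list_to_staff
  apply String.toList_inj.mp
  simp only [list_to_staff, list_to_staff_alt, String.toList_append, pvFoldA,
    PySem.Str.toList_join, pvMeasures_eq_chunked, pvMain]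
  rfl
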